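-- pv_equiv track=rewrite | github.com/Wbx0710/HuPERWM | huperjepa/data/vocab.py | normalize_text_for_char_ctc
-- ===== SOURCE A (Python) =====
-- from typing import Dict, Iterable, List, Sequence
--
-- def normalize_text_for_char_ctc(text: str) -> List[str]:
--     """Lowercase and keep [a-z], apostrophe and space only."""
--     chars: List[str] = []
--     prev_space = True
--     for ch in text.lower():
--         if "a" <= ch <= "z" or ch == "'":
--             chars.append(ch)
--             prev_space = False
--         elif ch.isspace():
--             if not prev_space:
--                 chars.append(" ")
--             prev_space = True
--     if chars and chars[-1] == " ":
--         chars.pop()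
--     return chars
-- ===== SOURCE B (Python) =====
-- def normalize_text_for_char_ctc(text):
--     """Filter first (whitespace -> ' ', disallowed chars dropped), then let
--     str.split()/str.join() do the collapsing and stripping."""
--     filtered = "".join(
--         c if "a" <= c <= "z" or c == "'" else (" " if c.isspace() else "")
--         for c in text.lower()
--     )
--     return list(" ".join(filtered.split()))
-- ===== Notes on version B (the rewrite author's own statement) =====
-- stated objective: idiomatic
-- what changed: Replaces A's single-pass state machine (prev_space flag plus final trailing-space pop) with a filter-then-split/join pipeline: map each character to itself/space/nothing, then let str.split()/str.join() collapse and strip whitespace.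
import Mathlib
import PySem

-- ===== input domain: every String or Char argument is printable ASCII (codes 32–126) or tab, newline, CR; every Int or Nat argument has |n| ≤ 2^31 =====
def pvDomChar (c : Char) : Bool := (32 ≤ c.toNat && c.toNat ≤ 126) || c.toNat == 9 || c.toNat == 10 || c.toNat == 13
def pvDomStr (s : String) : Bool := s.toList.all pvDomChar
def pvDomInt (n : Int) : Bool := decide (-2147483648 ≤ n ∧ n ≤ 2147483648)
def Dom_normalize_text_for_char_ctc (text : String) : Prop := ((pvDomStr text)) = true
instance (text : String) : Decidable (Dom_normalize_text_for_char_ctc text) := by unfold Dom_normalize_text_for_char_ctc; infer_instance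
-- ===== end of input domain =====

-- B replaces A's one-pass prev_space state machine (with final trailing-space pop) by a
-- filter-then-split/join pipeline; same cost, more idiomatic.

-- ===== PORT A =====
-- helper: the body of A's 'for ch in text.lower()' loop, state = (chars, prev_space)
def pvStepA (st : List String × Bool) (ch : Char) : List String × Bool :=
  if ('a' ≤ ch ∧ ch ≤ 'z') ∨ ch = '\'' then (st.1 ++ [String.ofList [ch]], false)
  else if PySem.Chars.isspace ch then ((if st.2 then st.1 else st.1 ++ [" "]), true)
  else st

def normalize_text_for_char_ctc (text : String) : List String :=
  -- chars = []; prev_space = True; for ch in text.lower(): ...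
  let st := (PySem.Str.lower text).toList.foldl pvStepA ([], true)
  -- if chars and chars[-1] == " ": chars.pop()
  if st.1 ≠ [] ∧ st.1.getLast? = some " " then st.1.dropLast else st.1

-- ===== PORT B =====
-- helper: one character of the filtering generator expression
def pvF (c : Char) : List Char :=
  if ('a' ≤ c ∧ c ≤ 'z') ∨ c = '\'' then [c]
  else if PySem.Chars.isspace c then [' '] else []

def normalize_text_for_char_ctc_alt (text : String) : List String :=
  -- filtered = "".join(c if ... else " " if c.isspace() else "" for c in text.lower())
  let filtered := (PySem.Str.lower text).toList.flatMap pvF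
  -- list(" ".join(filtered.split()))
  (PySem.Chars.join [' '] (PySem.Chars.split₀ filtered)).map (fun c => String.ofList [c])

-- ===== PRECONDITION & SPEC =====
def Spec_normalize_text_for_char_ctc (text : String) (out : List String) : Prop := out = normalize_text_for_char_ctc_alt text
instance (text : String) (out : List String) : Decidable (Spec_normalize_text_for_char_ctc text out) := by unfold Spec_normalize_text_for_char_ctc; infer_instance

-- ===== CLAIM (what is proved, stated in full; the proofs are below) =====
def Claim_equal_normalize_text_for_char_ctc : Prop := ∀ (text : String), Dom_normalize_text_for_char_ctc text → Spec_normalize_text_for_char_ctc text (normalize_text_for_char_ctc text)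

-- ===== LEMMAS AND PROOFS =====

-- A's loop at the character level (returns (chars, prev_space))
def pvLA : List Char → List Char → Bool → List Char × Bool
  | [], acc, prev => (acc, prev)
  | c :: s, acc, prev =>
    if ('a' ≤ c ∧ c ≤ 'z') ∨ c = '\'' then pvLA s (acc ++ [c]) false
    else if PySem.Chars.isspace c then pvLA s (if prev then acc else acc ++ [' ']) true
    else pvLA s acc prev

-- the same state machine on an already-filtered list (every non-space char is kept)
def pvNL : List Char → List Char → Bool → List Char
  | [], acc, _ => acc
  | c :: s, acc, prev =>
    if PySem.Chars.isspace c then pvNL s (if prev then acc else acc ++ [' ']) true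
    else pvNL s (acc ++ [c]) false

-- right-to-left collapse: single spaces between words, possibly one LEADING space
def pvH : List Char → List Char
  | [] => []
  | c :: s =>
    if PySem.Chars.isspace c then
      (if pvH s = [] then [] else if (pvH s).head? = some ' ' then pvH s else ' ' :: pvH s)
    else c :: pvH s

-- pvH with the possible leading space removed
def pvD (s : List Char) : List Char :=
  if (pvH s).head? = some ' ' then (pvH s).tail else pvH s

def pvAny : List Char → Bool
  | [] => false
  | c :: s => !PySem.Chars.isspace c || pvAny s

def pvEndsSp : List Char → Bool
  | [] => false
  | [c] => PySem.Chars.isspace c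
  | _ :: c :: s => pvEndsSp (c :: s)

def pvSing (c : Char) : String := String.ofList [c]

lemma pvKeep_not_space (c : Char) (h : ('a' ≤ c ∧ c ≤ 'z') ∨ c = '\'') :
    PySem.Chars.isspace c = false := by
  rcases h with ⟨h1, h2⟩ | rfl
  · simp only [Char.le_def] at h1 h2
    have g1 : 97 ≤ c.toNat := h1
    have g2 : c.toNat ≤ 122 := h2
    simp only [PySem.Chars.isspace, Bool.or_eq_false_iff, Bool.and_eq_false_iff,
      decide_eq_false_iff_not]
    omega
  · decide

lemma pvLA_eq_pvNL (l : List Char) : ∀ (acc : List Char) (prev : Bool),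
    (pvLA l acc prev).1 = pvNL (l.flatMap pvF) acc prev := by
  induction l with
  | nil => intro acc prev; simp [pvLA, pvNL]
  | cons c t ih =>
    intro acc prev
    by_cases hk : ('a' ≤ c ∧ c ≤ 'z') ∨ c = '\''
    · simp [pvLA, pvF, hk, pvNL, pvKeep_not_space c hk, ih]
    · by_cases hs : PySem.Chars.isspace c = true
      · simp [pvLA, pvF, hk, hs, pvNL, ih, (by decide : PySem.Chars.isspace ' ' = true)]
      · simp [pvLA, pvF, hk, hs, ih]

lemma pvNL_acc (l : List Char) : ∀ (acc : List Char) (prev : Bool),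
    pvNL l acc prev = acc ++ pvNL l [] prev := by
  induction l with
  | nil => intro acc prev; simp [pvNL]
  | cons c t ih =>
    intro acc prev
    by_cases hs : PySem.Chars.isspace c = true
    · cases prev with
      | true =>
        have e1 : pvNL (c :: t) acc true = pvNL t acc true := by simp [pvNL, hs]
        have e2 : pvNL (c :: t) [] true = pvNL t [] true := by simp [pvNL, hs]
        rw [e1, e2]
        exact ih acc true
      | false =>
        have e1 : pvNL (c :: t) acc false = pvNL t (acc ++ [' ']) true := by simp [pvNL, hs]
        have e2 : pvNL (c :: t) [] false = pvNL t [' '] true := by simp [pvNL, hs]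
        rw [e1, e2, ih (acc ++ [' ']), ih [' ']]
        simp
    · have hs' : PySem.Chars.isspace c = false := by simpa using hs
      have e1 : pvNL (c :: t) acc prev = pvNL t (acc ++ [c]) false := by simp [pvNL, hs']
      have e2 : pvNL (c :: t) [] prev = pvNL t [c] false := by simp [pvNL, hs']
      rw [e1, e2, ih (acc ++ [c]), ih [c]]
      simp

lemma pvH_cons_nonspace {c : Char} (t : List Char) (hc : PySem.Chars.isspace c = false) :
    pvH (c :: t) = c :: pvH t := by
  simp [pvH, hc]

lemma pvH_cons_space {c : Char} (t : List Char) (hc : PySem.Chars.isspace c = true) :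
    pvH (c :: t) = if pvH t = [] then [] else ' ' :: pvD t := by
  cases hr : pvH t with
  | nil => simp [pvH, hc, hr]
  | cons x rs =>
    by_cases hx : x = ' '
    · subst hx
      simp [pvH, hc, hr, pvD]
    · simp [pvH, hc, hr, pvD, hx]

lemma pvD_nil : pvD [] = [] := by simp [pvD, pvH]

lemma pvD_cons_space {c : Char} (t : List Char) (hc : PySem.Chars.isspace c = true) :
    pvD (c :: t) = pvD t := by
  rw [pvD, pvH_cons_space t hc]
  by_cases hr : pvH t = []
  · rw [if_pos hr]
    simp [pvD, hr]
  · rw [if_neg hr]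
    simp

lemma pvD_cons_nonspace {c : Char} (t : List Char) (hc : PySem.Chars.isspace c = false) :
    pvD (c :: t) = c :: pvH t := by
  have hcne : c ≠ ' ' := by rintro rfl; simp [PySem.Chars.isspace] at hc
  rw [pvD, pvH_cons_nonspace t hc]
  simp [hcne]

lemma pvH_eq_nil_iff (t : List Char) : pvH t = [] ↔ pvAny t = false := by
  induction t with
  | nil => simp [pvH, pvAny]
  | cons c s ih =>
    by_cases hs : PySem.Chars.isspace c = true
    · rw [pvH_cons_space s hs]
      by_cases hr : pvH s = []
      · simp [hr, pvAny, hs, ih.mp hr]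
      · rw [if_neg hr]
        have e : pvAny (c :: s) = pvAny s := by simp [pvAny, hs]
        rw [e]
        constructor
        · intro h; simp at h
        · intro h; exact absurd (ih.mpr h) hr
    · have hs' : PySem.Chars.isspace c = false := by simpa using hs
      rw [pvH_cons_nonspace s hs']
      simp [pvAny, hs']

lemma pvEndsSp_of_all_space (t : List Char) (ha : pvAny t = false) (hne : t ≠ []) :
    pvEndsSp t = true := by
  induction t with
  | nil => exact absurd rfl hne
  | cons c s ih =>
    simp only [pvAny, Bool.or_eq_false_iff, Bool.not_eq_false'] at ha
    cases s with
    | nil => simp [pvEndsSp, ha.1]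
    | cons c2 s2 => simp [pvEndsSp, ih ha.2 (by simp)]

lemma pvEndsSp_cons_cons (c c2 : Char) (s : List Char) :
    pvEndsSp (c :: c2 :: s) = pvEndsSp (c2 :: s) := by simp [pvEndsSp]

-- the closed form of A's state machine from the initial accumulator
lemma pvNL_closed (s : List Char) : ∀ (prev : Bool),
    pvNL s [] prev =
      (if prev then pvD s else pvH s) ++
        (if ((!prev || pvAny s) && pvEndsSp s) then [' '] else []) := by
  induction s with
  | nil => intro prev; cases prev <;> simp [pvNL, pvD, pvH, pvAny, pvEndsSp]
  | cons c t ih =>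
    intro prev
    by_cases hs : PySem.Chars.isspace c = true
    · cases prev with
      | true =>
        have hl : pvNL (c :: t) [] true = pvNL t [] true := by simp [pvNL, hs]
        rw [hl, ih true, pvD_cons_space t hs]
        cases ht : t with
        | nil => simp [pvAny, pvEndsSp, hs, pvD_nil]
        | cons c2 t2 =>
          rw [← ht]
          have e1 : pvAny (c :: t) = pvAny t := by simp [pvAny, hs]
          have e2 : pvEndsSp (c :: t) = pvEndsSp t := by rw [ht, pvEndsSp_cons_cons, ← ht]
          rw [e1, e2]
          simp
      | false =>
        have hl : pvNL (c :: t) [] false = ' ' :: pvNL t [] true := by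
          simp [pvNL, hs, pvNL_acc t [' '] true]
        rw [hl, ih true, pvH_cons_space t hs]
        by_cases hr : pvH t = []
        · have hany : pvAny t = false := (pvH_eq_nil_iff t).mp hr
          have hD : pvD t = [] := by simp [pvD, hr]
          rw [hD, hany, if_pos hr]
          cases ht : t with
          | nil => simp [pvAny, pvEndsSp, hs]
          | cons c2 t2 =>
            have hE : pvEndsSp t = true := pvEndsSp_of_all_space t hany (by simp [ht])
            rw [← ht]
            have e1 : pvAny (c :: t) = pvAny t := by simp [pvAny, hs]
            have e2 : pvEndsSp (c :: t) = pvEndsSp t := by rw [ht, pvEndsSp_cons_cons, ← ht]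
            rw [e1, e2, hany, hE]
            simp
        · have hany : pvAny t = true := by
            cases h2 : pvAny t with
            | false => exact absurd ((pvH_eq_nil_iff t).mpr h2) hr
            | true => rfl
          rw [if_neg hr, hany]
          cases ht : t with
          | nil => rw [ht] at hr; simp [pvH] at hr
          | cons c2 t2 =>
            rw [← ht]
            have e1 : pvAny (c :: t) = pvAny t := by simp [pvAny, hs]
            have e2 : pvEndsSp (c :: t) = pvEndsSp t := by rw [ht, pvEndsSp_cons_cons, ← ht]
            rw [e1, e2, hany]
            simp
    · have hs' : PySem.Chars.isspace c = false := by simpa using hs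
      have hl : pvNL (c :: t) [] prev = c :: pvNL t [] false := by
        simp [pvNL, hs', pvNL_acc t [c] false]
      rw [hl, ih false, pvH_cons_nonspace t hs', pvD_cons_nonspace t hs']
      cases ht : t with
      | nil => cases prev <;> simp [pvAny, pvEndsSp, hs']
      | cons c2 t2 =>
        rw [← ht]
        have e1 : pvAny (c :: t) = true := by simp [pvAny, hs']
        have e2 : pvEndsSp (c :: t) = pvEndsSp t := by rw [ht, pvEndsSp_cons_cons, ← ht]
        rw [e1, e2]
        cases prev <;> simp

lemma pvGoNilEq (cur : List Char) (acc : List (List Char)) (hc : cur ≠ []) :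
    PySem.Chars.split₀.go [] cur acc = (cur.reverse :: acc).reverse := by
  simp [PySem.Chars.split₀.go, List.isEmpty_eq_false_iff.mpr hc]

lemma pvGoConsSpace (c : Char) (s cur : List Char) (acc : List (List Char))
    (h : PySem.Chars.isspace c = true) (hc : cur ≠ []) :
    PySem.Chars.split₀.go (c :: s) cur acc = PySem.Chars.split₀.go s [] (cur.reverse :: acc) := by
  simp [PySem.Chars.split₀.go, h, List.isEmpty_eq_false_iff.mpr hc]

lemma pvGoConsSpaceNil (c : Char) (s : List Char) (acc : List (List Char))
    (h : PySem.Chars.isspace c = true) :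
    PySem.Chars.split₀.go (c :: s) [] acc = PySem.Chars.split₀.go s [] acc := by
  simp [PySem.Chars.split₀.go, h]

lemma pvGoConsNonspace (c : Char) (s cur : List Char) (acc : List (List Char))
    (h : PySem.Chars.isspace c = false) :
    PySem.Chars.split₀.go (c :: s) cur acc = PySem.Chars.split₀.go s (c :: cur) acc := by
  simp [PySem.Chars.split₀.go, h]

-- split₀.go with a non-trivial word accumulator
lemma pvGo_acc (s : List Char) : ∀ (cur : List Char) (acc : List (List Char)),
    PySem.Chars.split₀.go s cur acc = acc.reverse ++ PySem.Chars.split₀.go s cur [] := by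
  induction s with
  | nil =>
    intro cur acc
    by_cases hc : cur = []
    · subst hc; simp [PySem.Chars.split₀.go]
    · rw [pvGoNilEq cur acc hc, pvGoNilEq cur [] hc]
      simp
  | cons c t ih =>
    intro cur acc
    by_cases hs : PySem.Chars.isspace c = true
    · by_cases hc : cur = []
      · subst hc
        rw [pvGoConsSpaceNil c t acc hs, pvGoConsSpaceNil c t [] hs, ih [] acc]
      · rw [pvGoConsSpace c t cur acc hs hc, pvGoConsSpace c t cur [] hs hc,
          ih [] (cur.reverse :: acc), ih [] [cur.reverse]]
        simp
    · have hs' : PySem.Chars.isspace c = false := by simpa using hs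
      rw [pvGoConsNonspace c t cur acc hs', pvGoConsNonspace c t cur [] hs', ih (c :: cur) acc]

lemma pvGo_ne_nil (s : List Char) : ∀ (cur : List Char) (acc : List (List Char)),
    (cur ≠ [] ∨ acc ≠ []) → PySem.Chars.split₀.go s cur acc ≠ [] := by
  induction s with
  | nil =>
    intro cur acc h
    by_cases hc : cur = []
    · subst hc
      rcases h with h | h
      · exact absurd rfl h
      · simp [PySem.Chars.split₀.go, h]
    · rw [pvGoNilEq cur acc hc]; simp
  | cons c t ih =>
    intro cur acc h
    by_cases hs : PySem.Chars.isspace c = true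
    · by_cases hc : cur = []
      · subst hc
        rcases h with h | h
        · exact absurd rfl h
        · rw [pvGoConsSpaceNil c t acc hs]
          exact ih [] acc (Or.inr h)
      · rw [pvGoConsSpace c t cur acc hs hc]
        exact ih [] (cur.reverse :: acc) (Or.inr (by simp))
    · have hs' : PySem.Chars.isspace c = false := by simpa using hs
      rw [pvGoConsNonspace c t cur acc hs']
      exact ih (c :: cur) acc (Or.inl (by simp))

lemma pvSplit₀_eq_nil_iff (s : List Char) :
    PySem.Chars.split₀ s = [] ↔ pvAny s = false := by
  induction s with
  | nil => simp [PySem.Chars.split₀, PySem.Chars.split₀.go, pvAny]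
  | cons c t ih =>
    by_cases hs : PySem.Chars.isspace c = true
    · have h1 : PySem.Chars.split₀ (c :: t) = PySem.Chars.split₀ t := by
        unfold PySem.Chars.split₀
        exact pvGoConsSpaceNil c t [] hs
      rw [h1, ih]
      simp [pvAny, hs]
    · have hs' : PySem.Chars.isspace c = false := by simpa using hs
      have h1 : PySem.Chars.split₀ (c :: t) = PySem.Chars.split₀.go t [c] [] := by
        unfold PySem.Chars.split₀
        exact pvGoConsNonspace c t [] [] hs'
      rw [h1]
      constructor
      · intro h; exact absurd h (pvGo_ne_nil t [c] [] (Or.inl (by simp)))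
      · intro h; simp [pvAny, hs'] at h

lemma pvMain_go (n : Nat) : ∀ (s : List Char), s.length ≤ n →
    (PySem.Chars.join [' '] (PySem.Chars.split₀ s) = pvD s) ∧
    (∀ cur : List Char, cur ≠ [] →
      PySem.Chars.join [' '] (PySem.Chars.split₀.go s cur []) = cur.reverse ++ pvH s) := by
  induction n with
  | zero =>
    intro s hs
    have hnil : s = [] := List.eq_nil_of_length_eq_zero (Nat.le_zero.mp hs)
    subst hnil
    constructor
    · rw [pvD_nil]
      decide
    · intro cur hc
      rw [pvGoNilEq cur [] hc]
      show PySem.Chars.join [' '] [cur.reverse] = cur.reverse ++ pvH []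
      rw [PySem.Chars.join_singleton]
      simp [pvH]
  | succ n ih =>
    intro s hs
    cases s with
    | nil =>
      constructor
      · rw [pvD_nil]
        decide
      · intro cur hc
        rw [pvGoNilEq cur [] hc]
        show PySem.Chars.join [' '] [cur.reverse] = cur.reverse ++ pvH []
        rw [PySem.Chars.join_singleton]
        simp [pvH]
    | cons c t =>
      have ht : t.length ≤ n := Nat.le_of_succ_le_succ (by simpa using hs)
      have ihM := (ih t ht).1
      have ihG := (ih t ht).2
      constructor
      · by_cases hc : PySem.Chars.isspace c = true
        · have h1 : PySem.Chars.split₀ (c :: t) = PySem.Chars.split₀ t := by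
            unfold PySem.Chars.split₀
            exact pvGoConsSpaceNil c t [] hc
          rw [h1, ihM, pvD_cons_space t hc]
        · have hc' : PySem.Chars.isspace c = false := by simpa using hc
          have h1 : PySem.Chars.split₀ (c :: t) = PySem.Chars.split₀.go t [c] [] := by
            unfold PySem.Chars.split₀
            exact pvGoConsNonspace c t [] [] hc'
          rw [h1, ihG [c] (by simp), pvD_cons_nonspace t hc']
          simp
      · intro cur hcur
        by_cases hc : PySem.Chars.isspace c = true
        · have hstep : PySem.Chars.split₀.go (c :: t) cur [] =
              cur.reverse :: PySem.Chars.split₀ t := by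
            rw [pvGoConsSpace c t cur [] hc hcur, pvGo_acc t [] [cur.reverse]]
            simp [PySem.Chars.split₀]
          rw [hstep]
          cases hsp : PySem.Chars.split₀ t with
          | nil =>
            have hany : pvAny t = false := (pvSplit₀_eq_nil_iff t).mp hsp
            have hH : pvH t = [] := (pvH_eq_nil_iff t).mpr hany
            rw [pvH_cons_space t hc, if_pos hH, List.append_nil]
            exact PySem.Chars.join_singleton _ _
          | cons w ws =>
            have hne : pvH t ≠ [] := by
              intro h
              have h2 : pvAny t = false := (pvH_eq_nil_iff t).mp h
              rw [(pvSplit₀_eq_nil_iff t).mpr h2] at hsp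
              simp at hsp
            rw [pvH_cons_space t hc, if_neg hne]
            rw [PySem.Chars.join_cons_cons, ← hsp, ihM]
            simp
        · have hc' : PySem.Chars.isspace c = false := by simpa using hc
          rw [pvGoConsNonspace c t cur [] hc', ihG (c :: cur) (by simp),
            pvH_cons_nonspace t hc']
          simp

lemma pvGetLast_cons (a : Char) (l : List Char) (h : l ≠ []) :
    (a :: l).getLast? = l.getLast? := by
  cases l with
  | nil => exact absurd rfl h
  | cons b bs => rw [List.getLast?_cons_cons]

lemma pvH_head_space (s : List Char) : ∀ rs, pvH s = ' ' :: rs → rs ≠ [] := by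
  induction s with
  | nil => intro rs h; simp [pvH] at h
  | cons c t ih =>
    intro rs h
    by_cases hc : PySem.Chars.isspace c = true
    · rw [pvH_cons_space t hc] at h
      by_cases hr : pvH t = []
      · rw [if_pos hr] at h; simp at h
      · rw [if_neg hr] at h
        have hrs : rs = pvD t := by
          injection h with _ h2
          exact h2.symm
        subst hrs
        intro h0
        by_cases hy : (pvH t).head? = some ' '
        · cases hrt : pvH t with
          | nil => exact hr hrt
          | cons y ys =>
            rw [hrt] at hy
            simp only [List.head?_cons, Option.some.injEq] at hy
            subst hy
            have hDys : pvD t = ys := by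
              rw [pvD, hrt]
              simp
            rw [hDys] at h0
            exact ih ys hrt h0
        · rw [pvD, if_neg hy] at h0
          exact hr h0
    · have hc' : PySem.Chars.isspace c = false := by simpa using hc
      rw [pvH_cons_nonspace t hc'] at h
      have hce : c = ' ' := by
        have h2 := congrArg List.head? h
        simpa using h2
      rw [hce] at hc'
      exact absurd hc' (by decide)

lemma pvD_ne_nil (t : List Char) (hr : pvH t ≠ []) : pvD t ≠ [] := by
  intro h0
  by_cases hy : (pvH t).head? = some ' '
  · cases hrt : pvH t with
    | nil => exact hr hrt
    | cons y ys =>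
      rw [hrt] at hy
      simp only [List.head?_cons, Option.some.injEq] at hy
      subst hy
      have hDys : pvD t = ys := by
        rw [pvD, hrt]
        simp
      rw [hDys] at h0
      subst h0
      exact pvH_head_space t [] hrt rfl
  · rw [pvD, if_neg hy] at h0
    exact hr h0

lemma pvH_last_not_space (s : List Char) :
    ∀ c, (pvH s).getLast? = some c → PySem.Chars.isspace c = false := by
  induction s with
  | nil => intro c h; simp [pvH] at h
  | cons x t ih =>
    intro c h
    by_cases hx : PySem.Chars.isspace x = true
    · rw [pvH_cons_space t hx] at h
      by_cases hr : pvH t = []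
      · rw [if_pos hr] at h; simp at h
      · rw [if_neg hr] at h
        have hDne : pvD t ≠ [] := pvD_ne_nil t hr
        rw [pvGetLast_cons ' ' (pvD t) hDne] at h
        by_cases hy : (pvH t).head? = some ' '
        · rw [pvD, if_pos hy] at h
          cases hrt : pvH t with
          | nil => exact absurd hrt hr
          | cons y ys =>
            rw [hrt] at h
            simp only [List.tail_cons] at h
            have hys : ys ≠ [] := by
              intro h0
              rw [h0] at h
              simp at h
            apply ih c
            rw [hrt, pvGetLast_cons y ys hys]
            exact h
        · rw [pvD, if_neg hy] at h
          exact ih c h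
    · have hx' : PySem.Chars.isspace x = false := by simpa using hx
      rw [pvH_cons_nonspace t hx'] at h
      cases hrt : pvH t with
      | nil =>
        rw [hrt] at h
        simp at h
        subst h
        exact hx'
      | cons y ys =>
        rw [hrt, pvGetLast_cons x (y :: ys) (by simp)] at h
        apply ih c
        rw [hrt]
        exact h

lemma pvD_last_not_space (s : List Char) :
    ∀ c, (pvD s).getLast? = some c → PySem.Chars.isspace c = false := by
  intro c h
  by_cases hy : (pvH s).head? = some ' '
  · rw [pvD, if_pos hy] at h
    cases hrt : pvH s with
    | nil => rw [hrt] at h; simp at h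
    | cons y ys =>
      rw [hrt] at h
      simp only [List.tail_cons] at h
      have hys : ys ≠ [] := by
        intro h0
        rw [h0] at h
        simp at h
      apply pvH_last_not_space s c
      rw [hrt, pvGetLast_cons y ys hys]
      exact h
  · rw [pvD, if_neg hy] at h
    exact pvH_last_not_space s c h

-- A's whole computation at the character level equals B's
lemma pvCharMain (l : List Char) :
    (if (pvLA l [] true).1 ≠ [] ∧ ((pvLA l [] true).1).getLast? = some ' '
      then ((pvLA l [] true).1).dropLast else (pvLA l [] true).1) =
    PySem.Chars.join [' '] (PySem.Chars.split₀ (l.flatMap pvF)) := by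
  have hB := (pvMain_go (l.flatMap pvF).length (l.flatMap pvF) le_rfl).1
  rw [hB]
  have hA : (pvLA l [] true).1 = pvNL (l.flatMap pvF) [] true := pvLA_eq_pvNL l [] true
  rw [hA, pvNL_closed (l.flatMap pvF) true]
  simp only [Bool.not_true, Bool.false_or, if_true]
  by_cases htr : (pvAny (l.flatMap pvF) && pvEndsSp (l.flatMap pvF)) = true
  · rw [if_pos htr]
    have h1 : pvD (l.flatMap pvF) ++ [' '] ≠ [] := by simp
    have h2 : (pvD (l.flatMap pvF) ++ [' ']).getLast? = some ' ' := by simp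
    rw [if_pos ⟨h1, h2⟩, List.dropLast_concat]
  · rw [if_neg htr, List.append_nil]
    have hno : ¬ (pvD (l.flatMap pvF) ≠ [] ∧ (pvD (l.flatMap pvF)).getLast? = some ' ') := by
      rintro ⟨-, h2⟩
      have := pvD_last_not_space (l.flatMap pvF) ' ' h2
      simp [PySem.Chars.isspace] at this
    rw [if_neg hno]

-- A's String-level fold equals the character-level machine mapped through pvSing
lemma pvFoldA (l : List Char) : ∀ (acc : List Char) (prev : Bool),
    List.foldl pvStepA (acc.map pvSing, prev) l =
      ((pvLA l acc prev).1.map pvSing, (pvLA l acc prev).2) := by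
  induction l with
  | nil => intro acc prev; simp [pvLA]
  | cons c t ih =>
    intro acc prev
    by_cases hk : ('a' ≤ c ∧ c ≤ 'z') ∨ c = '\''
    · have hstep : pvStepA (acc.map pvSing, prev) c = ((acc ++ [c]).map pvSing, false) := by
        simp [pvStepA, hk, pvSing]
      rw [List.foldl_cons, hstep, ih (acc ++ [c]) false]
      simp [pvLA, hk]
    · by_cases hs : PySem.Chars.isspace c = true
      · cases prev with
        | true =>
          have hstep : pvStepA (acc.map pvSing, true) c = (acc.map pvSing, true) := by
            simp [pvStepA, hk, hs]
          rw [List.foldl_cons, hstep, ih acc true]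
          simp [pvLA, hk, hs]
        | false =>
          have hstep : pvStepA (acc.map pvSing, false) c = ((acc ++ [' ']).map pvSing, true) := by
            simp [pvStepA, hk, hs, pvSing]
          rw [List.foldl_cons, hstep, ih (acc ++ [' ']) true]
          simp [pvLA, hk, hs]
      · have hs' : PySem.Chars.isspace c = false := by simpa using hs
        have hstep : pvStepA (acc.map pvSing, prev) c = (acc.map pvSing, prev) := by
          simp [pvStepA, hk, hs']
        rw [List.foldl_cons, hstep, ih acc prev]
        simp [pvLA, hk, hs']

lemma pvSing_inj {a b : Char} (h : pvSing a = pvSing b) : a = b := by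
  have h2 := congrArg String.toList h
  simp [pvSing] at h2
  exact h2

-- ===== VERDICT (by name: the statement is the Claim_ definition above) =====
theorem normalize_text_for_char_ctc_spec : Claim_equal_normalize_text_for_char_ctc := by
  intro text _
  unfold Spec_normalize_text_for_char_ctc
  show normalize_text_for_char_ctc text = normalize_text_for_char_ctc_alt text
  simp only [normalize_text_for_char_ctc, normalize_text_for_char_ctc_alt]
  have hps : (fun c : Char => String.ofList [c]) = pvSing := rfl
  rw [hps]
  set l := (PySem.Str.lower text).toList with hl
  have hfold := pvFoldA l [] true
  simp only [List.map_nil] at hfold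
  rw [hfold]
  rw [← pvCharMain l]
  set r := (pvLA l [] true).1 with hr
  by_cases hcond : r ≠ [] ∧ r.getLast? = some ' '
  · have h1 : r.map pvSing ≠ [] := by simpa using hcond.1
    have h2 : (r.map pvSing).getLast? = some " " := by
      rw [List.getLast?_map, hcond.2]; rfl
    rw [if_pos ⟨h1, h2⟩, if_pos hcond, List.map_dropLast]
  · have hno : ¬ (r.map pvSing ≠ [] ∧ (r.map pvSing).getLast? = some " ") := by
      rintro ⟨h1, h2⟩
      apply hcond
      constructor
      · simpa using h1
      · rw [List.getLast?_map] at h2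
        cases hg : r.getLast? with
        | none => rw [hg] at h2; simp at h2
        | some x =>
          rw [hg] at h2
          simp only [Option.map_some, Option.some.injEq] at h2
          have hx : x = ' ' := pvSing_inj (h2.trans rfl)
          rw [hx]
    rw [if_neg hno, if_neg hcond]
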